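-- pv_equiv track=rewrite | github.com/vvindetta/lucy_notes_daemon | lucy_notes_manager/modules/plasma_sync/core.py | _merge_segs
-- ===== SOURCE A (Python) =====
-- from typing import List, Optional, Tuple
--
-- def _merge_segs(segs: List[Tuple[str, bool]]) -> List[Tuple[str, bool]]:
--     out: List[Tuple[str, bool]] = []
--     for text, is_bold in segs:
--         if not text:
--             continue
--         if out and out[-1][1] == is_bold:
--             out[-1] = (out[-1][0] + text, is_bold)
--         else:
--             out.append((text, is_bold))
--     return out
-- ===== SOURCE B (Python) =====
-- def _merge_segs(segs):
--     # Divide and conquer: filter out empty texts, then recursively merge the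
--     # two halves and join them at the boundary if the flags match.
--     return _dc([s for s in segs if s[0]])
--
-- def _dc(lst):
--     if len(lst) <= 1:
--         return list(lst)
--     mid = len(lst) // 2
--     left = _dc(lst[:mid])
--     right = _dc(lst[mid:])
--     if left and right and left[-1][1] == right[0][1]:
--         return left[:-1] + [(left[-1][0] + right[0][0], right[0][1])] + right[1:]
--     return left + right
-- ===== Notes on version B (the rewrite author's own statement) =====
-- stated objective: alternative
-- what changed: Replaces A's single left-to-right pass that compares and mutates out[-1] with a divide-and-conquer scheme: filter empty texts, recursively merge each half, and join the halves at the boundary when the edge flags match.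
import Mathlib
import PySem

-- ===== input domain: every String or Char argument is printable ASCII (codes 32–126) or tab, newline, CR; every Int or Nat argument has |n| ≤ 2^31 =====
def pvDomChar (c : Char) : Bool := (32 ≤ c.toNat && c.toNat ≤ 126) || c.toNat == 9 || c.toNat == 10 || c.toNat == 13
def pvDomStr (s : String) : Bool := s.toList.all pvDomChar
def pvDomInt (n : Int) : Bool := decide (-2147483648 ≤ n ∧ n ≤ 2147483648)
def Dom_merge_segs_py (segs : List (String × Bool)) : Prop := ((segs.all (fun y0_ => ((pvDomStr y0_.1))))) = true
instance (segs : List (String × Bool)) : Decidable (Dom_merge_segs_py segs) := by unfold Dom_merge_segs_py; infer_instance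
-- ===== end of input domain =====

-- B replaces A's compare-and-mutate-last accumulator by divide and conquer: filter empty
-- texts, recursively merge each half, join the halves at the boundary; alternative, not faster.


-- ===== PORT A =====
-- one iteration of A's loop body: skip empty text, else merge into out[-1] or append
def pvStepA (out : List (String × Bool)) (tb : String × Bool) : List (String × Bool) :=
  if tb.1 = "" then out
  else
    match out.getLast? with
    | some last =>
        if last.2 == tb.2 then out.dropLast ++ [(last.1 ++ tb.1, tb.2)]
        else out ++ [tb]
    | none => out ++ [tb]

def merge_segs_py (segs : List (String × Bool)) : List (String × Bool) :=
  segs.foldl pvStepA []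

-- ===== PORT B =====
-- B's boundary join: left[:-1] + [(left[-1][0]+right[0][0], right[0][1])] + right[1:]
-- when both halves are nonempty and the edge flags agree, else left + right
def pvCombine (a b : List (String × Bool)) : List (String × Bool) :=
  match a.getLast?, b with
  | some (lt, lb), (rt, rb) :: bt =>
      if lb == rb then a.dropLast ++ (lt ++ rt, rb) :: bt else a ++ b
  | _, _ => a ++ b

-- B's recursive halving (_dc)
def pvDC (l : List (String × Bool)) : List (String × Bool) :=
  if _h : l.length ≤ 1 then l
  else pvCombine (pvDC (l.take (l.length / 2))) (pvDC (l.drop (l.length / 2)))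
termination_by l.length
decreasing_by
  · simp only [List.length_take]
    omega
  · simp only [List.length_drop]
    omega

def merge_segs_py_alt (segs : List (String × Bool)) : List (String × Bool) :=
  pvDC (segs.filter (fun s => s.1 != ""))

-- ===== PRECONDITION & SPEC =====
def Spec_merge_segs_py (segs : List (String × Bool)) (out : List (String × Bool)) : Prop := out = merge_segs_py_alt segs
instance (segs : List (String × Bool)) (out : List (String × Bool)) : Decidable (Spec_merge_segs_py segs out) := by unfold Spec_merge_segs_py; infer_instance

-- ===== CLAIM (what is proved, stated in full; the proofs are below) =====
def Claim_equal_merge_segs_py : Prop := ∀ (segs : List (String × Bool)), Dom_merge_segs_py segs → Spec_merge_segs_py segs (merge_segs_py segs)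

-- ===== LEMMAS AND PROOFS =====

-- reference form: merge one (nonempty-text) segment into an already-merged tail
def pvMergeCons (t : String) (b : Bool) (r : List (String × Bool)) : List (String × Bool) :=
  match r with
  | (t2, b2) :: tl => if b2 == b then (t ++ t2, b) :: tl else (t, b) :: (t2, b2) :: tl
  | [] => [(t, b)]

def pvAltRec : List (String × Bool) → List (String × Bool)
  | [] => []
  | (t, b) :: rest => pvMergeCons t b (pvAltRec rest)

-- glue: A's accumulator `out` joined with an already-merged suffix `r`
def pvGlue (out r : List (String × Bool)) : List (String × Bool) :=
  match r with
  | [] => out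
  | (t, b) :: tl =>
      match out.getLast? with
      | some (lt, lb) => if lb == b then out.dropLast ++ (lt ++ t, b) :: tl else out ++ (t, b) :: tl
      | none => (t, b) :: tl

lemma pvGlue_step (out r : List (String × Bool)) (t : String) (b : Bool) (ht : t ≠ "") :
    pvGlue out (pvMergeCons t b r) = pvGlue (pvStepA out (t, b)) r := by
  rcases List.eq_nil_or_concat out with h | ⟨ys, ⟨lt, lb⟩, h⟩
  · subst h
    cases r with
    | nil => simp [pvGlue, pvMergeCons, pvStepA, ht]
    | cons hd tl =>
        obtain ⟨t2, b2⟩ := hd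
        by_cases hb : b2 = b
        · simp [pvGlue, pvMergeCons, pvStepA, ht, hb]
        · simp [pvGlue, pvMergeCons, pvStepA, ht, hb, Ne.symm hb]
  · subst h
    by_cases hlb : lb = b
    · subst hlb
      cases r with
      | nil =>
          simp [pvGlue, pvMergeCons, pvStepA, ht]
      | cons hd tl =>
          obtain ⟨t2, b2⟩ := hd
          by_cases hb : b2 = lb
          · simp [pvGlue, pvMergeCons, pvStepA, ht, hb, String.append_assoc]
          · simp [pvGlue, pvMergeCons, pvStepA, ht, hb, Ne.symm hb]
    · have hbeq : (lb == b) = false := by simp [hlb]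
      cases r with
      | nil =>
          simp [pvGlue, pvMergeCons, pvStepA, ht, hbeq]
      | cons hd tl =>
          obtain ⟨t2, b2⟩ := hd
          by_cases hb : b2 = b
          · simp [pvGlue, pvMergeCons, pvStepA, ht, hb, hbeq]
          · simp [pvGlue, pvMergeCons, pvStepA, ht, hb, Ne.symm hb, hbeq]

lemma pvLoop_glue (l : List (String × Bool)) : ∀ out : List (String × Bool),
    l.foldl pvStepA out = pvGlue out (pvAltRec (l.filter (fun s => s.1 != ""))) := by
  induction l with
  | nil => intro out; simp [pvGlue, pvAltRec]
  | cons hd tl ih =>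
      intro out
      obtain ⟨t, b⟩ := hd
      by_cases ht : t = ""
      · subst ht
        simp only [List.foldl_cons, List.filter_cons]
        have : pvStepA out ("", b) = out := by simp [pvStepA]
        simp [this, ih out]
      · have hf : List.filter (fun s => s.1 != "") ((t, b) :: tl)
            = (t, b) :: List.filter (fun s => s.1 != "") tl := by simp [ht]
        simp only [List.foldl_cons, hf]
        rw [ih (pvStepA out (t, b)),
          show pvAltRec ((t, b) :: List.filter (fun s => s.1 != "") tl)
              = pvMergeCons t b (pvAltRec (List.filter (fun s => s.1 != "") tl)) from rfl,
          pvGlue_step _ _ _ _ ht]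

lemma pvGlue_nil (r : List (String × Bool)) : pvGlue [] r = r := by
  cases r with
  | nil => rfl
  | cons hd tl => obtain ⟨t, b⟩ := hd; simp [pvGlue]

-- pvCombine commutes with merging one segment into the left argument's head
lemma pvCombine_mergeCons (t : String) (b : Bool) (x y : List (String × Bool)) :
    pvCombine (pvMergeCons t b x) y = pvMergeCons t b (pvCombine x y) := by
  match x, y with
  | [], [] => simp [pvCombine, pvMergeCons]
  | [], (ty, yb) :: yt =>
      by_cases hb : b = yb
      · simp [pvCombine, pvMergeCons, hb]
      · simp [pvCombine, pvMergeCons, hb, Ne.symm hb]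
  | (t2, b2) :: xt, y =>
      match xt, y with
      | [], [] =>
          by_cases hb : b2 = b <;> simp [pvCombine, pvMergeCons, hb]
      | [], (ty, yb) :: yt =>
          by_cases hy : b2 = yb
          · subst hy
            by_cases hb : b2 = b
            · subst hb
              simp [pvCombine, pvMergeCons, String.append_assoc]
            · simp [pvCombine, pvMergeCons, hb]
          · by_cases hb : b2 = b
            · subst hb
              simp [pvCombine, pvMergeCons, hy]
            · simp [pvCombine, pvMergeCons, hb, hy]
      | w :: ws, [] =>
          by_cases hb : b2 = b <;> simp [pvCombine, pvMergeCons, hb]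
      | w :: ws, (ty, yb) :: yt =>
          have hne : (w :: ws : List (String × Bool)) ≠ [] := by simp
          obtain ⟨⟨lt, lb⟩, hl⟩ : ∃ p, (w :: ws : List (String × Bool)).getLast? = some p :=
            ⟨_, List.getLast?_eq_some_getLast hne⟩
          by_cases hb : b2 = b <;> by_cases hy : lb = yb <;>
            simp [pvCombine, pvMergeCons, hb, hy, hl]

lemma pvCombine_nil_left (y : List (String × Bool)) : pvCombine [] y = y := by
  cases y <;> simp [pvCombine]

lemma pvAltRec_append (l r : List (String × Bool)) :
    pvAltRec (l ++ r) = pvCombine (pvAltRec l) (pvAltRec r) := by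
  induction l with
  | nil => simp [pvAltRec, pvCombine_nil_left]
  | cons hd tl ih =>
      obtain ⟨t, b⟩ := hd
      simp only [List.cons_append, pvAltRec, ih, pvCombine_mergeCons]

lemma pvDC_eq_altRec (l : List (String × Bool)) : pvDC l = pvAltRec l := by
  induction l using pvDC.induct with
  | case1 l h =>
      rw [pvDC]
      simp only [h, dif_pos]
      match l, h with
      | [], _ => rfl
      | [(t, b)], _ => simp [pvAltRec, pvMergeCons]
  | case2 l h ih1 ih2 =>
      rw [pvDC]
      simp only [h, dif_neg, not_false_iff, ih1, ih2]
      rw [← pvAltRec_append, List.take_append_drop]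

-- ===== VERDICT (by name: the statement is the Claim_ definition above) =====
theorem merge_segs_py_spec : Claim_equal_merge_segs_py := by
  intro segs _
  show merge_segs_py segs = merge_segs_py_alt segs
  rw [merge_segs_py, merge_segs_py_alt, pvLoop_glue, pvGlue_nil, pvDC_eq_altRec]
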